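-- pv_equiv track=rewrite | github.com/hunter-monaghan/Content-Engine | src/content_engine/providers/trends.py | _keywords_from_text
-- ===== SOURCE A (Python) =====
-- def _keywords_from_text(text: str, niche: str) -> list[str]:
--     tokens = [
--         word.strip(".,!?\"'():;").lower()
--         for word in text.split()
--         if len(word.strip(".,!?\"'():;")) > 3
--     ]
--     seen = {niche.lower()}
--     keywords = [niche.lower()]
--     for token in tokens:
--         if token not in seen:
--             seen.add(token)
--             keywords.append(token)
--         if len(keywords) == 8:
--             break
--     return keywords
-- ===== SOURCE B (Python) =====
-- def _keywords_from_text(text: str, niche: str) -> list[str]: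
--     tokens = [
--         word.strip(".,!?\"'():;").lower()
--         for word in text.split()
--         if len(word.strip(".,!?\"'():;")) > 3
--     ]
--     n = niche.lower()
--     firsts = []
--     rest = [t for t in tokens if t != n]
--     while rest and len(firsts) < 7:
--         head = rest[0]
--         firsts.append(head)
--         rest = [t for t in rest[1:] if t != head]
--     return [n] + firsts
-- ===== Notes on version B (the rewrite author's own statement) =====
-- stated objective: alternative
-- what changed: A's streaming pass with a seen-set, an accumulator and an early break is replaced by a selection sieve with no seen structure: repeatedly take the first remaining token and delete all its duplicates from the remainder, for at most 7 rounds, with the niche keyword filtered out up front and prepended.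
import Mathlib
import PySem

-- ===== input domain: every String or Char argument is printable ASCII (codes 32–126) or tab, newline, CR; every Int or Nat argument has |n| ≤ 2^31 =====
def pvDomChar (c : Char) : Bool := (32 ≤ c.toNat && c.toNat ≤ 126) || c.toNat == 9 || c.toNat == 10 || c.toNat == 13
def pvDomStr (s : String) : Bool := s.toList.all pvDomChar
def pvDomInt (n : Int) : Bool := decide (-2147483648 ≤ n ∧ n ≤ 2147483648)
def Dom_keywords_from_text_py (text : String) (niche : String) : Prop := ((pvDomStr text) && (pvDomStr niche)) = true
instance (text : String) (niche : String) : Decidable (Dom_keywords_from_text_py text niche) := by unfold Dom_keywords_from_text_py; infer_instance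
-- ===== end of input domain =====

-- B replaces A's seen-set streaming pass (with early break) by a selection sieve with no seen
-- structure at all: repeatedly take the first remaining token and delete its duplicates from
-- the remainder, at most 7 rounds (an 'alternative' decomposition, same cost in practice).

-- ===== PORT A =====
-- tokens = [word.strip(".,!?\"'():;").lower() for word in text.split() if len(word.strip(".,!?\"'():;")) > 3]
def pvTokens (text : String) : List String :=
  ((PySem.Str.split₀ text).filter
      (fun w => decide (3 < PySem.Str.len (PySem.Str.stripChars w ".,!?\"'():;")))).map
    (fun w => PySem.Str.lower (PySem.Str.stripChars w ".,!?\"'():;"))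

-- the 'for token in tokens' loop of A, with its early break at len(keywords) == 8
def pvALoop (ts : List String) (seen : PySem.Set String) (kws : List String) : List String :=
  match ts with
  | [] => kws
  | t :: rest =>
    let st := if !(PySem.Set.contains seen t) then (PySem.Set.add seen t, kws ++ [t]) else (seen, kws)
    if st.2.length == 8 then st.2 else pvALoop rest st.1 st.2

def keywords_from_text_py (text : String) (niche : String) : List String :=
  let n := PySem.Str.lower niche
  pvALoop (pvTokens text) (PySem.Set.add PySem.Set.empty n) [n]

-- ===== PORT B =====
-- the 'while rest and len(firsts) < 7' sieve of B: append the head, drop its duplicates ahead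
def pvBLoop (firsts : List String) (rest : List String) : List String :=
  match rest with
  | [] => firsts
  | head :: tl =>
    if firsts.length < 7 then
      pvBLoop (firsts ++ [head]) (tl.filter (fun t => decide (t ≠ head)))
    else firsts
termination_by rest.length
decreasing_by simpa using Nat.lt_succ_of_le (le_trans (List.length_filter_le _ tl.attach) (by simp))

def keywords_from_text_py_alt (text : String) (niche : String) : List String :=
  let n := PySem.Str.lower niche
  n :: pvBLoop [] ((pvTokens text).filter (fun t => decide (t ≠ n)))

-- ===== PRECONDITION & SPEC =====
def Spec_keywords_from_text_py (text : String) (niche : String) (out : List String) : Prop := out = keywords_from_text_py_alt text niche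
instance (text : String) (niche : String) (out : List String) : Decidable (Spec_keywords_from_text_py text niche out) := by unfold Spec_keywords_from_text_py; infer_instance

-- ===== CLAIM (what is proved, stated in full; the proofs are below) =====
def Claim_equal_keywords_from_text_py : Prop := ∀ (text : String) (niche : String), Dom_keywords_from_text_py text niche → Spec_keywords_from_text_py text niche (keywords_from_text_py text niche)

-- ===== LEMMAS AND PROOFS =====

-- proof helper: the uncapped sieve (what pvBLoop computes before the 7-cap)
def pvSieve : List String → List String
  | [] => []
  | head :: tl => head :: pvSieve (tl.filter (fun t => decide (t ≠ head)))
termination_by l => l.length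
decreasing_by simpa using Nat.lt_succ_of_le (le_trans (List.length_filter_le _ tl.attach) (by simp))

-- proof helper: sieve that skips (instead of pre-filtering) the members of acc
def pvFirstsM (acc : List String) : List String → List String
  | [] => []
  | h :: tl =>
    if h ∈ acc then pvFirstsM acc tl
    else h :: pvFirstsM acc (tl.filter (fun t => decide (t ≠ h)))
termination_by l => l.length
decreasing_by
  · simp
  · simpa [List.length_unattach] using
      Nat.lt_succ_of_le (le_trans (List.length_filter_le _ tl.attach) (by simp))

-- folding Set.add only ever appends, so the start list is a prefix of the result
lemma prefix_foldl_add (ts : List String) : ∀ (s : List String),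
    s <+: ts.foldl PySem.Set.add s := by
  induction ts with
  | nil => intro s; simp [List.foldl]
  | cons t rest ih =>
    intro s
    refine List.IsPrefix.trans ?_ (ih (PySem.Set.add s t))
    by_cases h : t ∈ s
    · rw [PySem.Set.add_of_mem h]
    · rw [PySem.Set.add_of_not_mem h]; exact ⟨[t], rfl⟩

-- A's loop, started with seen = keywords (as lists), is fold-add followed by take 8
lemma loop_eq (ts : List String) : ∀ (kws : List String), kws.length < 8 →
    pvALoop ts kws kws = (ts.foldl PySem.Set.add kws).take 8 := by
  induction ts with
  | nil =>
    intro kws h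
    simp [pvALoop, List.take_of_length_le (Nat.le_of_lt h)]
  | cons t rest ih =>
    intro kws h
    by_cases hc : t ∈ kws
    · have hcc : PySem.Set.contains kws t = true := by
        simpa [PySem.Set.contains_eq_listContains] using hc
      simp only [pvALoop, hcc, Bool.not_true, Bool.false_eq_true, if_false, List.foldl]
      rw [PySem.Set.add_of_mem hc]
      have : (kws.length == 8) = false := by simp; omega
      simp only [this, Bool.false_eq_true, if_false]
      exact ih kws h
    · have hcc : PySem.Set.contains kws t = false := by
        simpa [PySem.Set.contains_eq_listContains] using hc
      simp only [pvALoop, hcc, Bool.not_false, if_true, List.foldl]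
      rw [PySem.Set.add_of_not_mem hc]
      have hlen : (kws ++ [t]).length = kws.length + 1 := by simp
      by_cases hl : (kws ++ [t]).length = 8
      · have : ((kws ++ [t]).length == 8) = true := by simp [hl]
        simp only [this, if_true]
        obtain ⟨r, hr⟩ := prefix_foldl_add rest (kws ++ [t])
        rw [← hr, ← hl, List.take_left]
      · rw [hlen] at hl
        have : ((kws ++ [t]).length == 8) = false := by rw [hlen]; simp; omega
        simp only [this, Bool.false_eq_true, if_false]
        exact ih (kws ++ [t]) (by rw [hlen]; omega)

-- elements already in the set contribute nothing to the fold
lemma foldl_add_filter (h : String) : ∀ (ts acc : List String), h ∈ acc →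
    ts.foldl PySem.Set.add acc = (ts.filter (fun t => decide (t ≠ h))).foldl PySem.Set.add acc := by
  intro ts
  induction ts with
  | nil => intro acc _; rfl
  | cons t rest ih =>
    intro acc hmem
    by_cases ht : t = h
    · subst ht
      rw [List.filter_cons, if_neg (by simp), List.foldl, PySem.Set.add_of_mem hmem]
      exact ih acc hmem
    · rw [List.filter_cons, if_pos (by simp [ht]), List.foldl, List.foldl]
      apply ih
      by_cases hta : t ∈ acc
      · rwa [PySem.Set.add_of_mem hta]
      · rw [PySem.Set.add_of_not_mem hta]; simp [hmem]

-- pvFirstsM ignores an extra seen element that does not occur in the list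
lemma firstsM_append (h : String) : ∀ (m : Nat) (ts acc : List String), ts.length ≤ m → h ∉ ts →
    pvFirstsM (acc ++ [h]) ts = pvFirstsM acc ts := by
  intro m
  induction m with
  | zero =>
    intro ts acc hm _
    rw [List.eq_nil_of_length_eq_zero (Nat.le_zero.mp hm)]
    simp [pvFirstsM]
  | succ k ih =>
    intro ts acc hm hnot
    match ts with
    | [] => simp [pvFirstsM]
    | t :: tl =>
      have hth : t ≠ h := fun he => hnot (he ▸ List.mem_cons_self)
      have htl : h ∉ tl := fun he => hnot (List.mem_cons_of_mem _ he)
      have hmemEq : (t ∈ acc ++ [h]) ↔ (t ∈ acc) := by simp [hth]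
      by_cases hta : t ∈ acc
      · simp only [pvFirstsM]
        rw [if_pos (hmemEq.mpr hta), if_pos hta]
        exact ih tl acc (by simpa using Nat.lt_succ_iff.mp (Nat.lt_of_lt_of_le (by simp) hm)) htl
      · simp only [pvFirstsM]
        rw [if_neg (fun hx => hta (hmemEq.mp hx)), if_neg hta]
        congr 1
        exact ih _ acc
          (Nat.le_trans (List.length_filter_le _ _)
            (by simpa using Nat.lt_succ_iff.mp (Nat.lt_of_lt_of_le (Nat.lt_succ_self _) hm)))
          (fun he => htl (List.mem_of_mem_filter he))

-- the fold of Set.add is acc followed by the skip-sieve of the remaining tokens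
lemma foldl_add_eq_firstsM : ∀ (m : Nat) (ts acc : List String), ts.length ≤ m →
    ts.foldl PySem.Set.add acc = acc ++ pvFirstsM acc ts := by
  intro m
  induction m with
  | zero =>
    intro ts acc hm
    rw [List.eq_nil_of_length_eq_zero (Nat.le_zero.mp hm)]
    simp [pvFirstsM]
  | succ k ih =>
    intro ts acc hm
    match ts with
    | [] => simp [pvFirstsM]
    | t :: tl =>
      have htl : tl.length ≤ k := by simpa using Nat.lt_succ_iff.mp (Nat.lt_of_lt_of_le (by simp) hm)
      by_cases hta : t ∈ acc
      · rw [List.foldl, PySem.Set.add_of_mem hta]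
        simp only [pvFirstsM]
        rw [if_pos hta]
        exact ih tl acc htl
      · rw [List.foldl, PySem.Set.add_of_not_mem hta]
        simp only [pvFirstsM]
        rw [if_neg hta]
        rw [foldl_add_filter t tl (acc ++ [t]) (by simp)]
        rw [ih _ (acc ++ [t]) (Nat.le_trans (List.length_filter_le _ _) htl)]
        rw [firstsM_append t k _ acc (Nat.le_trans (List.length_filter_le _ _) htl)
          (fun he => by simpa using (List.mem_filter.mp he).2)]
        simp

-- pre-filtering the excluded element is the same as skipping it on the fly
lemma sieve_filter_eq_firstsM (n : String) : ∀ (m : Nat) (ts : List String), ts.length ≤ m →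
    pvSieve (ts.filter (fun t => decide (t ≠ n))) = pvFirstsM [n] ts := by
  intro m
  induction m with
  | zero =>
    intro ts hm
    rw [List.eq_nil_of_length_eq_zero (Nat.le_zero.mp hm)]
    simp [pvSieve, pvFirstsM]
  | succ k ih =>
    intro ts hm
    match ts with
    | [] => simp [pvSieve, pvFirstsM]
    | t :: tl =>
      have htl : tl.length ≤ k := by simpa using Nat.lt_succ_iff.mp (Nat.lt_of_lt_of_le (by simp) hm)
      by_cases ht : t = n
      · subst ht
        rw [List.filter_cons, if_neg (by simp)]
        simp only [pvFirstsM]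
        rw [if_pos (by simp)]
        exact ih tl htl
      · rw [List.filter_cons, if_pos (by simp [ht])]
        simp only [pvSieve, pvFirstsM]
        rw [if_neg (by simp [ht])]
        congr 1
        rw [List.filter_filter, ← ih (tl.filter (fun t' => decide (t' ≠ t)))
              (Nat.le_trans (List.length_filter_le _ _) htl),
            List.filter_filter]
        congr 1
        apply List.filter_congr
        intro x _
        rw [Bool.and_comm]

-- B's capped sieve loop is the uncapped sieve truncated to 7, appended to firsts
lemma bloop_eq : ∀ (m : Nat) (rest firsts : List String), rest.length ≤ m → firsts.length ≤ 7 →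
    pvBLoop firsts rest = (firsts ++ pvSieve rest).take 7 := by
  intro m
  induction m with
  | zero =>
    intro rest firsts hm h7
    rw [List.eq_nil_of_length_eq_zero (Nat.le_zero.mp hm)]
    simp [pvBLoop, pvSieve, List.take_of_length_le h7]
  | succ k ih =>
    intro rest firsts hm h7
    match rest with
    | [] => simp [pvBLoop, pvSieve, List.take_of_length_le h7]
    | head :: tl =>
      by_cases hlt : firsts.length < 7
      · simp only [pvBLoop, pvSieve]
        rw [if_pos hlt,
          ih _ (firsts ++ [head]) (Nat.le_trans (List.length_filter_le _ _)
            (by simpa using Nat.lt_succ_iff.mp (Nat.lt_of_lt_of_le (by simp) hm))) (by simp; omega)]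
        simp
      · have h7' : firsts.length = 7 := by omega
        simp only [pvBLoop]
        rw [if_neg hlt, ← h7', List.take_left]

-- ===== VERDICT (by name: the statement is the Claim_ definition above) =====
theorem keywords_from_text_py_spec : Claim_equal_keywords_from_text_py := by
  intro text niche _
  unfold Spec_keywords_from_text_py
  show pvALoop (pvTokens text)
      (PySem.Set.add PySem.Set.empty (PySem.Str.lower niche)) [PySem.Str.lower niche]
    = PySem.Str.lower niche
        :: pvBLoop [] ((pvTokens text).filter (fun t => decide (t ≠ PySem.Str.lower niche)))
  have hadd : PySem.Set.add PySem.Set.empty (PySem.Str.lower niche) = [PySem.Str.lower niche] := by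
    simp [PySem.Set.add_of_not_mem, PySem.Set.empty]
  rw [hadd, loop_eq (pvTokens text) [PySem.Str.lower niche] (by simp),
    foldl_add_eq_firstsM (pvTokens text).length _ _ le_rfl,
    bloop_eq ((pvTokens text).filter _).length _ [] le_rfl (by simp),
    sieve_filter_eq_firstsM _ (pvTokens text).length _ le_rfl]
  simp [List.take_succ_cons]
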